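-- pv_equiv track=rewrite | github.com/cvhs-cs-2017/sem2-exam1-ChrisLotoph | Encrypt.py | pen
-- ===== SOURCE A (Python) =====
-- def pen(taco):
--     CipherText = ""
--     for i in taco:
--         if i == "s":
--             CipherText = CipherText + "#"
--         elif i == "t":
--             CipherText = CipherText + "%"
--         elif i == "s":
--             CipherText = CipherText + "^"
--         elif i == "x":
--             CipherText = CipherText + "&"
--         elif i == "w":
--             CipherText = CipherText + "*"
--         elif i == "y":
--             CipherText = CipherText + "@"
--         elif i == "z":
--             CipherText = CipherText + "+"
--         else:
--             CipherText = CipherText + i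
--     return CipherText
-- ===== SOURCE B (Python) =====
-- # Staged passes: six whole-string replace passes, one per substituted letter.
-- # Correct because the replacement symbols (#%&*@+) are never among the
-- # substituted letters (stxwyz), so later passes cannot touch earlier output;
-- # the dead duplicate 's' branch in A means 's' maps only to '#'.
-- def pen(taco):
--     for old, new in (("s", "#"), ("t", "%"), ("x", "&"), ("w", "*"), ("y", "@"), ("z", "+")):
--         taco = taco.replace(old, new)
--     return taco
-- ===== Notes on version B (the rewrite author's own statement) =====
-- stated objective: faster
-- what changed: B replaces A's character-by-character loop with its if/elif cascade and string accumulation by six staged whole-string str.replace passes, one per substituted letter (correct because the replacement symbols are disjoint from the substituted letters); each pass runs at C level, removing the per-character Python interpreter work.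
import Mathlib
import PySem

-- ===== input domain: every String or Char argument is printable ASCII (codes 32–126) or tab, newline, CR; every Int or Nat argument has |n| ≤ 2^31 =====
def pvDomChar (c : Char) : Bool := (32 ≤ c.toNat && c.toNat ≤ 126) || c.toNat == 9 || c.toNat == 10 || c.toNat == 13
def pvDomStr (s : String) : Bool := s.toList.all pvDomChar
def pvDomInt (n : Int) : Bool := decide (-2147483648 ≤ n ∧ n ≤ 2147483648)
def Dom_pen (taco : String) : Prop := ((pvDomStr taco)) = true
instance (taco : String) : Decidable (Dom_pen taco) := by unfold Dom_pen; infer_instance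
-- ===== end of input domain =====

-- B replaces A's per-character if/elif loop by six staged whole-string replace passes,
-- one per substituted letter (measurably faster in Python: C-level passes instead of a per-character interpreter loop).

-- ===== PORT A =====
-- literal transliteration of A: loop over the characters, if/elif cascade in the same order
-- (including the dead duplicate 's' branch), accumulating the ciphertext string.
def pen (taco : String) : String :=
  taco.toList.foldl (fun cipherText i =>
    if i = 's' then cipherText ++ "#"
    else if i = 't' then cipherText ++ "%"
    else if i = 's' then cipherText ++ "^"
    else if i = 'x' then cipherText ++ "&"
    else if i = 'w' then cipherText ++ "*"
    else if i = 'y' then cipherText ++ "@"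
    else if i = 'z' then cipherText ++ "+"
    else cipherText ++ String.ofList [i]) ""

-- ===== PORT B =====
-- the (old, new) substitution pairs B iterates over
def penSubs : List (String × String) :=
  [("s", "#"), ("t", "%"), ("x", "&"), ("w", "*"), ("y", "@"), ("z", "+")]

-- Source B: for old, new in pairs: taco = taco.replace(old, new); return taco
def pen_alt (taco : String) : String :=
  penSubs.foldl (fun s p => PySem.Str.replace s p.1 p.2) taco

-- ===== PRECONDITION & SPEC =====
def Spec_pen (taco : String) (out : String) : Prop := out = pen_alt taco
instance (taco : String) (out : String) : Decidable (Spec_pen taco out) := by unfold Spec_pen; infer_instance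

-- ===== CLAIM =====
def Claim_equal_pen : Prop := ∀ (taco : String), Dom_pen taco → Spec_pen taco (pen taco)

-- ===== LEMMAS AND PROOFS =====

-- one-character substitution
def substC (a b c : Char) : Char := if c = a then b else c

-- the net effect of A's cascade on one character
def casC (c : Char) : Char :=
  if c = 's' then '#'
  else if c = 't' then '%'
  else if c = 'x' then '&'
  else if c = 'w' then '*'
  else if c = 'y' then '@'
  else if c = 'z' then '+'
  else c

-- replace.go on a one-character pattern is a plain character map
lemma replace_go_single (a b : Char) (fuel : Nat) (l acc : List Char) (h : l.length ≤ fuel) :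
    PySem.Chars.replace.go [a] [b] fuel l acc = acc.reverse ++ l.map (substC a b) := by
  induction fuel generalizing l acc with
  | zero =>
    cases l with
    | nil => simp [PySem.Chars.replace.go]
    | cons c t => simp at h
  | succ fuel ih =>
    cases l with
    | nil => simp [PySem.Chars.replace.go]
    | cons c t =>
      rw [PySem.Chars.replace.go]
      by_cases hc : a = c
      · subst hc
        simp only [List.isPrefixOf, BEq.rfl, Bool.and_self, if_true, List.length_cons] at *
        rw [ih _ _ (by simpa using h)]
        simp [substC]
      · have hp : List.isPrefixOf [a] (c :: t) = false := by
          simp [List.isPrefixOf, hc]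
        rw [hp]
        simp only [Bool.false_eq_true, if_false]
        rw [ih _ _ (by simpa using Nat.le_of_succ_le_succ (by simpa using h))]
        simp [substC, Ne.symm hc]

-- a whole-string replace pass with one-character old/new is a map over the characters
lemma replace_single (a b : Char) (s : String) :
    (PySem.Str.replace s (String.ofList [a]) (String.ofList [b])).toList
      = s.toList.map (substC a b) := by
  have h1 : (String.ofList [a]).toList = [a] := by simp
  have h2 : (String.ofList [b]).toList = [b] := by simp
  simp only [PySem.Str.replace, h1, h2, PySem.Chars.replace]
  rw [if_neg (by simp)]
  simpa using replace_go_single a b s.toList.length s.toList [] le_rfl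

-- the six staged substitutions applied to one character equal A's cascade effect
lemma chain_eq_cas (c : Char) :
    substC 'z' '+' (substC 'y' '@' (substC 'w' '*' (substC 'x' '&'
      (substC 't' '%' (substC 's' '#' c))))) = casC c := by
  by_cases h1 : c = 's'; · subst h1; decide
  by_cases h2 : c = 't'; · subst h2; decide
  by_cases h3 : c = 'x'; · subst h3; decide
  by_cases h4 : c = 'w'; · subst h4; decide
  by_cases h5 : c = 'y'; · subst h5; decide
  by_cases h6 : c = 'z'; · subst h6; decide
  simp [substC, casC, h1, h2, h3, h4, h5, h6]

-- the six staged substitutions over a list equal one map of A's cascade effect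
lemma maps_chain (l : List Char) :
    ((((((l.map (substC 's' '#')).map (substC 't' '%')).map (substC 'x' '&')).map
        (substC 'w' '*')).map (substC 'y' '@')).map (substC 'z' '+')) = l.map casC := by
  simp only [List.map_map]
  apply List.map_congr_left
  intro c _
  simpa [Function.comp] using chain_eq_cas c

-- B's staged passes, character-wise
lemma pen_alt_toList (taco : String) :
    (pen_alt taco).toList = taco.toList.map casC := by
  refine Eq.trans ?_ (maps_chain taco.toList)
  have e : ∀ (a b : Char) (olds news s : String), olds.toList = [a] → news.toList = [b] →
      (PySem.Str.replace s olds news).toList = s.toList.map (substC a b) := by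
    intro a b olds news s ha hb
    have := replace_single a b s
    simp only [PySem.Str.replace, String.toList_ofList, ha, hb] at this ⊢
    exact this
  show (PySem.Str.replace (PySem.Str.replace (PySem.Str.replace (PySem.Str.replace
      (PySem.Str.replace (PySem.Str.replace taco "s" "#") "t" "%") "x" "&") "w" "*")
      "y" "@") "z" "+").toList = _
  rw [e 'z' '+' "z" "+" _ rfl rfl, e 'y' '@' "y" "@" _ rfl rfl, e 'w' '*' "w" "*" _ rfl rfl,
      e 'x' '&' "x" "&" _ rfl rfl, e 't' '%' "t" "%" _ rfl rfl, e 's' '#' "s" "#" _ rfl rfl]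

-- A's if/elif cascade applied to one character appends its cascade effect
lemma pen_step (acc : String) (c : Char) :
    (if c = 's' then acc ++ "#"
     else if c = 't' then acc ++ "%"
     else if c = 's' then acc ++ "^"
     else if c = 'x' then acc ++ "&"
     else if c = 'w' then acc ++ "*"
     else if c = 'y' then acc ++ "@"
     else if c = 'z' then acc ++ "+"
     else acc ++ String.ofList [c])
    = acc ++ String.ofList [casC c] := by
  by_cases h1 : c = 's'; · subst h1; simp [casC]
  rw [if_neg h1, if_neg h1]
  by_cases h2 : c = 't'; · subst h2; simp [casC]
  rw [if_neg h2]
  by_cases h3 : c = 'x'; · subst h3; simp [casC]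
  rw [if_neg h3]
  by_cases h4 : c = 'w'; · subst h4; simp [casC]
  rw [if_neg h4]
  by_cases h5 : c = 'y'; · subst h5; simp [casC]
  rw [if_neg h5]
  by_cases h6 : c = 'z'; · subst h6; simp [casC]
  rw [if_neg h6]
  simp [casC, h1, h2, h3, h4, h5, h6]

-- A's fold with any accumulator equals that accumulator followed by the mapped characters
lemma pen_foldl (l : List Char) (acc : String) :
    l.foldl (fun cipherText i =>
      if i = 's' then cipherText ++ "#"
      else if i = 't' then cipherText ++ "%"
      else if i = 's' then cipherText ++ "^"
      else if i = 'x' then cipherText ++ "&"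
      else if i = 'w' then cipherText ++ "*"
      else if i = 'y' then cipherText ++ "@"
      else if i = 'z' then cipherText ++ "+"
      else cipherText ++ String.ofList [i]) acc
    = acc ++ String.ofList (l.map casC) := by
  induction l generalizing acc with
  | nil => simp
  | cons c l ih =>
    rw [List.foldl_cons, pen_step, ih, String.append_assoc]
    congr 1
    apply String.toList_injective
    simp

-- ===== VERDICT =====
theorem pen_spec : Claim_equal_pen := by
  intro taco _
  unfold Spec_pen
  unfold pen
  rw [pen_foldl]
  apply String.toList_injective
  rw [pen_alt_toList]
  simp
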